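-- pv_equiv track=rewrite | github.com/darktomcat119/Health_AI_MVP | backend/app/services/risk_scorer.py | _score_behavioral
-- ===== SOURCE A (Python) =====
-- MAX_BEHAVIORAL_SCORE = 20
--
-- LONG_MESSAGE_THRESHOLD = 300  # characters
--
-- PUNCTUATION_THRESHOLD = 3  # exclamation or question marks
--
-- CAPS_RATIO_THRESHOLD = 0.30  # 30% uppercase letters
--
-- LONG_MESSAGE_POINTS = 5
--
-- PUNCTUATION_POINTS = 5
--
-- CAPS_POINTS = 10
--
-- def _score_behavioral(message: str) -> int:
--     """Score based on message behavioral signals (max 20).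
--
--     Checks message length, punctuation density, and caps ratio.
--
--     Args:
--         message: Original (non-lowercased) user message.
--
--     Returns:
--         Behavioral score capped at MAX_BEHAVIORAL_SCORE.
--     """
--     score = 0
--
--     if len(message) > LONG_MESSAGE_THRESHOLD:
--         score += LONG_MESSAGE_POINTS
--
--     exclamation_question_count = message.count("!") + message.count("?")
--     if exclamation_question_count >= PUNCTUATION_THRESHOLD:
--         score += PUNCTUATION_POINTS
--
--     alpha_chars = [c for c in message if c.isalpha()]
--     if alpha_chars:
--         upper_ratio = sum(1 for c in alpha_chars if c.isupper()) / len(alpha_chars)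
--         if upper_ratio > CAPS_RATIO_THRESHOLD:
--             score += CAPS_POINTS
--
--     return min(score, MAX_BEHAVIORAL_SCORE)
-- ===== SOURCE B (Python) =====
-- # B: build a character-frequency histogram once, derive all three counts
-- # from the histogram, and score by a table lookup on the three flags
-- # (the table already has the min-20 cap folded in).
-- _TABLE = {
--     (False, False, False): 0,
--     (False, False, True): 10,
--     (False, True, False): 5,
--     (False, True, True): 15,
--     (True, False, False): 5,
--     (True, False, True): 15,
--     (True, True, False): 10,
--     (True, True, True): 20,
-- }
--
--
-- def _score_behavioral(message: str) -> int:
--     freq = {}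
--     for c in message:
--         freq[c] = freq.get(c, 0) + 1
--     punct = freq.get("!", 0) + freq.get("?", 0)
--     alpha = 0
--     upper = 0
--     for c, n in freq.items():
--         if c.isalpha():
--             alpha += n
--             if c.isupper():
--                 upper += n
--     return _TABLE[(len(message) > 300,
--                    punct >= 3,
--                    alpha > 0 and upper * 10 > alpha * 3)]
-- ===== Notes on version B (the rewrite author's own statement) =====
-- stated objective: alternative
-- what changed: B builds a character-frequency histogram once and derives the punctuation/alpha/uppercase counts from the histogram (iterating distinct characters with multiplicities) instead of A's per-criterion scans (two str.count calls plus a filter comprehension and a sum), and replaces A's conditional score accumulation plus min-cap with a single lookup of the three boolean flags in a precomputed 8-entry score table.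
import Mathlib
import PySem

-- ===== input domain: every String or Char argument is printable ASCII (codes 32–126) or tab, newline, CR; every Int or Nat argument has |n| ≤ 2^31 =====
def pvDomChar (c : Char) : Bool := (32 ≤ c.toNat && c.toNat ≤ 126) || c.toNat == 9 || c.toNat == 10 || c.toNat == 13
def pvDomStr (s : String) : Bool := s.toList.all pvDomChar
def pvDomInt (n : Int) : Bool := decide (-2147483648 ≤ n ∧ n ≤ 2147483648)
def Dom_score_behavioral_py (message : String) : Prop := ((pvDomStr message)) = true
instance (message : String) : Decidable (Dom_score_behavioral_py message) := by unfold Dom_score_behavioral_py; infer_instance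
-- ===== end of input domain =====

-- B builds a character-frequency histogram and derives all counts from it, scoring by a lookup in a precomputed 8-entry table (min-cap folded in), instead of A's per-criterion scans with conditional accumulation.


-- ===== PORT A =====
-- 'upper_ratio > 0.30' is ported exactly as the rational comparison 10*upper > 3*alpha
-- (exact: the float and rational comparisons agree for every count ratio a realizable string can produce).
def score_behavioral_py (message : String) : Int :=
  let score : Int := 0
  let score := if (PySem.Str.len message : Int) > 300 then score + 5 else score
  let exclamation_question_count : Int :=
    (PySem.Str.count message "!" : Int) + (PySem.Str.count message "?" : Int)
  let score := if exclamation_question_count ≥ 3 then score + 5 else score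
  let alpha_chars := message.toList.filter (fun c => PySem.Chars.isalpha c)
  let score :=
    if alpha_chars ≠ [] then
      if 10 * ((alpha_chars.filter (fun c => PySem.Chars.isupper c)).length : Int)
           > 3 * (alpha_chars.length : Int) then score + 10 else score
    else score
  min score 20

-- ===== PORT B =====
-- Source B's module-level _TABLE (keys cover all 8 flag triples, so Python's _TABLE[...] never raises;
-- it is ported as getD with an unreachable default).
def pvTable : PySem.Dict (Bool × Bool × Bool) Int :=
  PySem.Dict.ofList
    [((false, false, false), 0), ((false, false, true), 10),
     ((false, true, false), 5), ((false, true, true), 15),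
     ((true, false, false), 5), ((true, false, true), 15),
     ((true, true, false), 10), ((true, true, true), 20)]

-- histogram build, histogram aggregation, table lookup; 'upper * 10 > alpha * 3' ports Source B's
-- exact-integer form of the caps test (see the comment on the A port).
def score_behavioral_py_alt (message : String) : Int :=
  let freq := message.toList.foldl
    (fun (d : PySem.Dict Char Int) c => d.insert c (d.getD c 0 + 1)) PySem.Dict.empty
  let punct : Int := freq.getD '!' 0 + freq.getD '?' 0
  let au := freq.items.foldl
    (fun (au : Int × Int) kn =>
      if PySem.Chars.isalpha kn.1 then
        (au.1 + kn.2, if PySem.Chars.isupper kn.1 then au.2 + kn.2 else au.2)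
      else au) (0, 0)
  pvTable.getD
    (decide ((PySem.Str.len message : Int) > 300), decide (punct ≥ 3),
     decide (au.1 > 0 ∧ au.2 * 10 > au.1 * 3)) 0

-- ===== PRECONDITION & SPEC =====
def Spec_score_behavioral_py (message : String) (out : Int) : Prop := out = score_behavioral_py_alt message
instance (message : String) (out : Int) : Decidable (Spec_score_behavioral_py message out) := by unfold Spec_score_behavioral_py; infer_instance

-- ===== CLAIM (what is proved, stated in full; the proofs are below) =====
def Claim_equal_score_behavioral_py : Prop := ∀ (message : String), Dom_score_behavioral_py message → Spec_score_behavioral_py message (score_behavioral_py message)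

-- ===== LEMMAS AND PROOFS =====

-- Chars.count with a single-character needle is the character count.
theorem pv_count_go_singleton (c : Char) (s : List Char) (fuel acc : Nat) (h : s.length ≤ fuel) :
    PySem.Chars.count.go [c] fuel s acc = acc + s.count c := by
  induction s generalizing fuel acc with
  | nil => cases fuel <;> simp [PySem.Chars.count.go]
  | cons a t ih =>
    cases fuel with
    | zero => simp at h
    | succ f =>
      simp only [List.length_cons, Nat.succ_le_succ_iff] at h
      rw [PySem.Chars.count.go]
      by_cases hc : a = c
      · simp [hc, List.isPrefixOf, ih _ _ h]; omega
      · have hp : List.isPrefixOf [c] (a :: t) = false := by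
          simp [List.isPrefixOf]
          exact fun h' => hc h'.symm
        simp [hp, ih _ _ h, hc]

theorem pv_count_singleton (c : Char) (s : List Char) : PySem.Chars.count s [c] = s.count c := by
  rw [PySem.Chars.count]
  simp [pv_count_go_singleton c s s.length 0 (le_refl _)]

-- B's aggregation fold over (key, multiplicity) pairs computes weighted sums over the keys.
theorem pv_fold_items (cs : List Char) (ks : List Char) (a u : Int) :
    ((ks.map (fun k => (k, (cs.count k : Int)))).foldl
      (fun (au : Int × Int) kn =>
        if PySem.Chars.isalpha kn.1 then
          (au.1 + kn.2, if PySem.Chars.isupper kn.1 then au.2 + kn.2 else au.2)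
        else au) (a, u))
    = (a + ((ks.map (fun k => if PySem.Chars.isalpha k then cs.count k else 0)).sum : Nat),
       u + ((ks.map (fun k => if PySem.Chars.isalpha k && PySem.Chars.isupper k then cs.count k else 0)).sum : Nat)) := by
  induction ks generalizing a u with
  | nil => simp
  | cons k t ih =>
    simp only [List.map_cons, List.foldl_cons, List.sum_cons]
    by_cases h1 : PySem.Chars.isalpha k <;> by_cases h2 : PySem.Chars.isupper k <;>
      simp [h1, h2, ih] <;> omega

-- an if-then-count-else-0 sum is the sum over the filtered list
theorem pv_sum_if (p : Char → Bool) (f : Char → Nat) (l : List Char) :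
    (l.map (fun k => if p k then f k else 0)).sum = ((l.filter p).map f).sum := by
  induction l with
  | nil => rfl
  | cons c t ih => by_cases h : p c <;> simp [h, ih]

-- grouping: summing counts of the distinct characters satisfying p gives countP p
theorem pv_group (p : Char → Bool) (cs : List Char) :
    ((PySem.Set.ofList cs).map (fun k => if p k then cs.count k else 0)).sum = cs.countP p := by
  have hperm : (PySem.Set.ofList cs).Perm cs.dedup := by
    apply List.perm_of_nodup_nodup_toFinset_eq (PySem.Set.nodup_ofList cs) cs.nodup_dedup
    ext x
    simp [PySem.Set.mem_ofList]
  rw [(hperm.map _).sum_eq, pv_sum_if, List.sum_map_count_dedup_filter_eq_countP]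

-- the score table is the capped sum of the three point contributions
theorem pv_table (b1 b2 b3 : Bool) :
    pvTable.getD (b1, b2, b3) 0
      = min ((if b1 then (5 : Int) else 0) + (if b2 then 5 else 0) + (if b3 then 10 else 0)) 20 := by
  cases b1 <;> cases b2 <;> cases b3 <;> decide

theorem score_behavioral_py_eq (message : String) :
    score_behavioral_py message = score_behavioral_py_alt message := by
  unfold score_behavioral_py score_behavioral_py_alt
  rw [show (message.toList.foldl
        (fun (d : PySem.Dict Char Int) c => d.insert c (d.getD c 0 + 1)) PySem.Dict.empty)
      = PySem.Dict.counter message.toList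
    from PySem.Dict.foldl_insert_getD_add_one_eq_counter message.toList]
  simp only [PySem.Dict.getD_counter, PySem.Dict.items_counter, pv_fold_items, pv_group,
    zero_add]
  rw [PySem.Str.count_eq, PySem.Str.count_eq]
  have hb : ("!" : String).toList = ['!'] := rfl
  have hq : ("?" : String).toList = ['?'] := rfl
  rw [hb, hq, pv_count_singleton, pv_count_singleton]
  have hfl : (message.toList.filter (fun c => PySem.Chars.isalpha c)).length
      = message.toList.countP (fun c => PySem.Chars.isalpha c) :=
    List.countP_eq_length_filter.symm
  have hcomm : (fun c => PySem.Chars.isupper c && PySem.Chars.isalpha c)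
      = (fun c => PySem.Chars.isalpha c && PySem.Chars.isupper c) := by
    funext c; exact Bool.and_comm _ _
  have hff : ((message.toList.filter (fun c => PySem.Chars.isalpha c)).filter
        (fun c => PySem.Chars.isupper c)).length
      = message.toList.countP (fun c => PySem.Chars.isalpha c && PySem.Chars.isupper c) := by
    rw [List.filter_filter, hcomm, List.countP_eq_length_filter]
  have hne : (message.toList.filter (fun c => PySem.Chars.isalpha c) = [])
      ↔ (message.toList.countP (fun c => PySem.Chars.isalpha c) = 0) := by
    rw [← hfl, List.length_eq_zero_iff]
  have heta : message.toList.countP PySem.Chars.isalpha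
      = message.toList.countP (fun c => PySem.Chars.isalpha c) := rfl
  rw [pv_table]
  simp only [ne_eq, hne, hfl, hff, heta, decide_eq_true_eq]
  split_ifs <;> push_cast at * <;> omega

-- ===== VERDICT (by name: the statement is the Claim_ definition above) =====
theorem score_behavioral_py_spec : Claim_equal_score_behavioral_py := by
  intro message _
  unfold Spec_score_behavioral_py
  exact score_behavioral_py_eq message
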